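-- pv_equiv track=rewrite | github.com/adrianceniceros/TFGUNIR | API/emailClassification.py | parse_mainText
-- ===== SOURCE A (Python) =====
-- def parse_mainText(rawtext):
--     """ Get de main text of a given EML structure, avoiding the thread composed by answers or resends.
--
--     Args:
--         rawtext(str): the text with standard EML format.
--
--     Returns:
--        The main text of a query.
--
--     """
--     texto_primermensaje = ""
--     cuenta = 0
--     for line in rawtext.splitlines(): #split when end string appears
--         cuenta = cuenta+1
--         buscador = line.find("Inicio del mensaje reenviado")
--         if buscador >= 0:
--             break
--         buscador = line.find("-- Mensaje Original --")
--         if buscador >= 0: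
--             break
--         buscador = line.find("--- mail_boundary ---")
--         if buscador >= 0:
--             break
--         buscador = line.find("ADVERTENCIA LEGAL")
--         if buscador >= 0:
--             break
--         buscador = line.find("LEGAL WARNING")
--         if buscador >= 0:
--             break
--         buscador = line.find("Aviso Legal")
--         if buscador >= 0:
--             break
--         buscador = line.find("Advertencia legal")
--         if buscador >= 0:
--             break
--
--         texto_primermensaje = texto_primermensaje + "" + line
--
--     texto_primermensaje = texto_primermensaje.replace("'","")
--     texto_primermensaje = texto_primermensaje.replace('\"','')
--     return(texto_primermensaje)
-- ===== SOURCE B (Python) =====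
-- MARKERS = [
--     "Inicio del mensaje reenviado",
--     "-- Mensaje Original --",
--     "--- mail_boundary ---",
--     "ADVERTENCIA LEGAL",
--     "LEGAL WARNING",
--     "Aviso Legal",
--     "Advertencia legal",
-- ]
--
--
-- def parse_mainText(rawtext):
--     # Cut the raw text at the earliest marker occurrence, then trim back to the
--     # start of the line containing it; finally drop line-break and quote chars.
--     hits = [p for p in (rawtext.find(m) for m in MARKERS) if p >= 0]
--     if hits:
--         prefix = rawtext[:min(hits)]
--         prefix = prefix[:max(prefix.rfind('\n'), prefix.rfind('\r')) + 1]
--     else: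
--         prefix = rawtext
--     return ''.join(ch for ch in prefix if ch not in "\n\r'\"")
-- ===== Notes on version B (the rewrite author's own statement) =====
-- stated objective: alternative
-- what changed: Replaces A's line-by-line accumulate-and-break loop (seven inline find/break branches per line) by a raw-text algorithm: find the earliest marker occurrence in the whole text, slice the text before it, trim back to the last line break, and delete line-break and quote characters in one filter pass; no splitlines and no per-line loop.
import Mathlib
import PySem

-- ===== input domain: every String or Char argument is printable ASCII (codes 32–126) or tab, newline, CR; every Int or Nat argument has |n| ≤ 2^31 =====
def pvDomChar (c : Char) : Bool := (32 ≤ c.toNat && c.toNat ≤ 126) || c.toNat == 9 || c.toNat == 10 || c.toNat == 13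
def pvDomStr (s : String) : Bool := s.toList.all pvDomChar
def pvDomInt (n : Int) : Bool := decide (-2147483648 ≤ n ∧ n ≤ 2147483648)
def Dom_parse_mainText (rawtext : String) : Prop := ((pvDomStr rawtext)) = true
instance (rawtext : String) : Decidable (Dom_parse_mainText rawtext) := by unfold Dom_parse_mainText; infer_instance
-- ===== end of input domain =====

-- B replaces A's line-by-line accumulate-and-break loop by a raw-text algorithm: find the
-- earliest marker occurrence in the whole text, slice before it, trim back to the last line
-- break, then filter out line-break and quote characters (objective: alternative).


-- ===== PORT A =====
-- A's for-loop with break, as structural recursion over the lines with the accumulator.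
def parse_mainText_loopA (acc : List Char) : List (List Char) → List Char
  | [] => acc
  | line :: rest =>
    if 0 ≤ PySem.Chars.find line "Inicio del mensaje reenviado".toList then acc
    else if 0 ≤ PySem.Chars.find line "-- Mensaje Original --".toList then acc
    else if 0 ≤ PySem.Chars.find line "--- mail_boundary ---".toList then acc
    else if 0 ≤ PySem.Chars.find line "ADVERTENCIA LEGAL".toList then acc
    else if 0 ≤ PySem.Chars.find line "LEGAL WARNING".toList then acc
    else if 0 ≤ PySem.Chars.find line "Aviso Legal".toList then acc
    else if 0 ≤ PySem.Chars.find line "Advertencia legal".toList then acc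
    else parse_mainText_loopA (acc ++ [] ++ line) rest

def parse_mainText (rawtext : String) : String :=
  let texto := parse_mainText_loopA [] (PySem.Chars.splitlines rawtext.toList)
  let texto := PySem.Chars.replace texto "'".toList "".toList
  let texto := PySem.Chars.replace texto "\"".toList "".toList
  String.ofList texto

-- ===== PORT B =====
def pvMarkers : List (List Char) :=
  ["Inicio del mensaje reenviado".toList, "-- Mensaje Original --".toList,
   "--- mail_boundary ---".toList, "ADVERTENCIA LEGAL".toList,
   "LEGAL WARNING".toList, "Aviso Legal".toList, "Advertencia legal".toList]

-- Source B: hits = [p for p in (rawtext.find(m) for m in MARKERS) if p >= 0]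
def pvHits (s : List Char) : List Int :=
  (pvMarkers.map (fun m => PySem.Chars.find s m)).filter (fun p => 0 ≤ p)

-- Source B's prefix computation: slice before the earliest hit, trim back to the last line break.
def pvPrefix (s : List Char) : List Char :=
  if (pvHits s).isEmpty then s
  else
    let cut := (PySem.List.min? (pvHits s) (fun p => p)).getD 0
    let pre1 := PySem.Chars.slice s none (some cut)
    PySem.Chars.slice pre1 none
      (some (max (PySem.Chars.rfind pre1 ['\n']) (PySem.Chars.rfind pre1 ['\r']) + 1))

def parse_mainText_alt (rawtext : String) : String :=
  String.ofList ((pvPrefix rawtext.toList).filter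
    (fun ch => !(ch == '\n' || ch == '\r' || ch == '\'' || ch == '"')))

-- ===== PRECONDITION & SPEC =====
def Spec_parse_mainText (rawtext : String) (out : String) : Prop := out = parse_mainText_alt rawtext
instance (rawtext : String) (out : String) : Decidable (Spec_parse_mainText rawtext out) := by unfold Spec_parse_mainText; infer_instance

-- ===== CLAIM (what is proved, stated in full; the proofs are below) =====
def Claim_equal_parse_mainText : Prop := ∀ (rawtext : String), Dom_parse_mainText rawtext → Spec_parse_mainText rawtext (parse_mainText rawtext)

-- ===== LEMMAS AND PROOFS =====

def pvHit (line : List Char) : Bool := pvMarkers.any (fun m => PySem.Chars.isIn m line)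

def pvABody (s : List Char) : List Char :=
  PySem.Chars.join []
    ((PySem.Chars.splitlines s).take
      (((PySem.Chars.splitlines s).findIdx? pvHit).getD (PySem.Chars.splitlines s).length))



-- ---------- A-side loop characterization ----------
lemma join_empty_cons (a : List Char) (l : List (List Char)) :
    PySem.Chars.join [] (a :: l) = a ++ PySem.Chars.join [] l := by
  cases l with
  | nil => simp [PySem.Chars.join_singleton, PySem.Chars.join_nil]
  | cons b t => simp [PySem.Chars.join_cons_cons]

set_option maxHeartbeats 1000000 in
lemma pvHit_iff (line : List Char) :
    pvHit line = true ↔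
      (0 ≤ PySem.Chars.find line "Inicio del mensaje reenviado".toList ∨
       0 ≤ PySem.Chars.find line "-- Mensaje Original --".toList ∨
       0 ≤ PySem.Chars.find line "--- mail_boundary ---".toList ∨
       0 ≤ PySem.Chars.find line "ADVERTENCIA LEGAL".toList ∨
       0 ≤ PySem.Chars.find line "LEGAL WARNING".toList ∨
       0 ≤ PySem.Chars.find line "Aviso Legal".toList ∨
       0 ≤ PySem.Chars.find line "Advertencia legal".toList) := by
  simp only [pvHit, pvMarkers, List.any_cons, List.any_nil, Bool.or_eq_true,
    PySem.Chars.isIn_iff_infix, PySem.Chars.find_nonneg_iff, Bool.false_eq_true, or_false]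

set_option maxHeartbeats 2000000 in
lemma loopA_eq (lines : List (List Char)) (acc : List Char) :
    parse_mainText_loopA acc lines =
      acc ++ PySem.Chars.join []
        (lines.take ((lines.findIdx? pvHit).getD lines.length)) := by
  induction lines generalizing acc with
  | nil => simp [parse_mainText_loopA, PySem.Chars.join_nil]
  | cons line rest ih =>
    by_cases h : pvHit line = true
    · have h' := (pvHit_iff line).mp h
      rw [parse_mainText_loopA]
      rw [List.findIdx?_cons, if_pos h]
      simp only [Option.getD_some, List.take_zero, PySem.Chars.join_nil, List.append_nil]
      split_ifs <;> first | rfl | (exfalso; revert h'; simp_all)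
    · have h7 := (pvHit_iff line).not.mp h
      push_neg at h7
      obtain ⟨h1, h2, h3, h4, h5, h6, hh7⟩ := h7
      rw [parse_mainText_loopA]
      rw [if_neg (by omega), if_neg (by omega), if_neg (by omega), if_neg (by omega),
          if_neg (by omega), if_neg (by omega), if_neg (by omega)]
      rw [ih]
      rw [List.findIdx?_cons, if_neg h]
      cases hfi : rest.findIdx? pvHit with
      | none =>
        simp [hfi, List.take_succ_cons, join_empty_cons]
      | some k =>
        simp [hfi, List.take_succ_cons, join_empty_cons]

def pvLB (c : Char) : Bool := c == '\n' || c == '\r'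

def pvIsB (c : Char) : Bool :=
  (decide (c.toNat = 10) || decide (c.toNat = 13) || decide (c.toNat = 11) || decide (c.toNat = 12) ||
   decide (c.toNat = 28) || decide (c.toNat = 29) || decide (c.toNat = 30) || decide (c.toNat = 133) ||
   decide (c.toNat = 8232) || decide (c.toNat = 8233))

lemma splitlines_eq_go (s : List Char) :
    PySem.Chars.splitlines s = PySem.Chars.splitlines.go pvIsB s [] [] := rfl

lemma char_eq_of_toNat {c d : Char} (h : c.toNat = d.toNat) : c = d := by
  have hv : c.val = d.val := by rw [← UInt32.toNat_inj]; exact h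
  exact Char.ext hv

lemma beq_char_toNat (c d : Char) : (c == d) = decide (c.toNat = d.toNat) := by
  by_cases h : c.toNat = d.toNat
  · simp [h, char_eq_of_toNat h]
  · simp [h]
    intro he
    exact absurd (he ▸ rfl) h

lemma isB_eq_LB (c : Char) (h : pvDomChar c = true) : pvIsB c = pvLB c := by
  have h' : (32 ≤ c.toNat ∧ c.toNat ≤ 126) ∨ c.toNat = 9 ∨ c.toNat = 10 ∨ c.toNat = 13 := by
    unfold pvDomChar at h
    simp only [Bool.or_eq_true, Bool.and_eq_true, decide_eq_true_eq, beq_iff_eq] at h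
    omega
  unfold pvIsB pvLB
  rw [beq_char_toNat c '\n', beq_char_toNat c '\r']
  have h10 : ('\n').toNat = 10 := by decide
  have h13 : ('\r').toNat = 13 := by decide
  rw [h10, h13]
  have hA : ¬ c.toNat = 11 := by omega
  have hB : ¬ c.toNat = 12 := by omega
  have hC : ¬ c.toNat = 28 := by omega
  have hD : ¬ c.toNat = 29 := by omega
  have hE : ¬ c.toNat = 30 := by omega
  have hF : ¬ c.toNat = 133 := by omega
  have hG : ¬ c.toNat = 8232 := by omega
  have hH : ¬ c.toNat = 8233 := by omega
  simp [hA, hB, hC, hD, hE, hF, hG, hH]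

lemma go_nil (cur : List Char) (acc : List (List Char)) :
    PySem.Chars.splitlines.go pvIsB [] cur acc =
      if cur.isEmpty then acc.reverse else (cur.reverse :: acc).reverse := by
  rw [PySem.Chars.splitlines.go]

lemma go_crlf (rest cur : List Char) (acc : List (List Char)) :
    PySem.Chars.splitlines.go pvIsB ('\r' :: '\n' :: rest) cur acc =
      PySem.Chars.splitlines.go pvIsB rest [] (cur.reverse :: acc) := by
  rw [PySem.Chars.splitlines.go]

lemma go_cons_ne (c : Char) (h : c ≠ '\r') (rest cur : List Char) (acc : List (List Char)) :
    PySem.Chars.splitlines.go pvIsB (c :: rest) cur acc =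
      (if pvIsB c then PySem.Chars.splitlines.go pvIsB rest [] (cur.reverse :: acc)
       else PySem.Chars.splitlines.go pvIsB rest (c :: cur) acc) := by
  rw [PySem.Chars.splitlines.go]
  all_goals (intro _ hc _; exact absurd hc h)

lemma go_cr_nil (cur : List Char) (acc : List (List Char)) :
    PySem.Chars.splitlines.go pvIsB ['\r'] cur acc =
      PySem.Chars.splitlines.go pvIsB [] [] (cur.reverse :: acc) := by
  rw [PySem.Chars.splitlines.go]
  rw [PySem.Chars.splitlines.go]
  · rw [if_pos (by decide)]
    rw [PySem.Chars.splitlines.go]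
  all_goals (intro _ _ hc; simp at hc)

lemma go_cr_cons (x : Char) (hx : x ≠ '\n') (rest cur : List Char) (acc : List (List Char)) :
    PySem.Chars.splitlines.go pvIsB ('\r' :: x :: rest) cur acc =
      PySem.Chars.splitlines.go pvIsB (x :: rest) [] (cur.reverse :: acc) := by
  nth_rewrite 1 [PySem.Chars.splitlines.go]
  · rw [if_pos (by decide)]
  all_goals (intro _ _ hc; cases hc; exact absurd rfl hx)

lemma go_acc_aux : ∀ (n : Nat) (t cur : List Char) (acc : List (List Char)), t.length ≤ n →
    PySem.Chars.splitlines.go pvIsB t cur acc =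
      acc.reverse ++ PySem.Chars.splitlines.go pvIsB t cur [] := by
  intro n
  induction n with
  | zero =>
    intro t cur acc h
    have : t = [] := by cases t <;> simp_all
    subst this
    rw [go_nil, go_nil]
    by_cases hc : cur.isEmpty <;> simp [hc]
  | succ n ih =>
    intro t cur acc h
    rcases t with _ | ⟨c, t'⟩
    · rw [go_nil, go_nil]
      by_cases hc : cur.isEmpty <;> simp [hc]
    · by_cases hc : c = '\r'
      · subst hc
        rcases t' with _ | ⟨x, t''⟩
        · rw [go_cr_nil, go_cr_nil, go_nil, go_nil]
          simp
        · by_cases hx : x = '\n'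
          · subst hx
            rw [go_crlf, go_crlf, ih t'' [] _ (by simp at h ⊢; omega),
                ih t'' [] [cur.reverse] (by simp at h ⊢; omega)]
            simp
          · rw [go_cr_cons x hx, go_cr_cons x hx,
                ih (x :: t'') [] _ (by simp at h ⊢; omega),
                ih (x :: t'') [] [cur.reverse] (by simp at h ⊢; omega)]
            simp
      · rw [go_cons_ne c hc, go_cons_ne c hc]
        by_cases hb : pvIsB c
        · rw [if_pos hb, if_pos hb, ih t' [] _ (by simpa using h),
              ih t' [] [cur.reverse] (by simpa using h)]
          simp
        · rw [if_neg hb, if_neg hb, ih t' (c :: cur) acc (by simpa using h)]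

lemma go_acc (t cur : List Char) (acc : List (List Char)) :
    PySem.Chars.splitlines.go pvIsB t cur acc =
      acc.reverse ++ PySem.Chars.splitlines.go pvIsB t cur [] :=
  go_acc_aux t.length t cur acc (le_refl _)

lemma go_absorb : ∀ (l0 t cur : List Char) (acc : List (List Char)),
    (∀ c ∈ l0, pvIsB c = false) →
    PySem.Chars.splitlines.go pvIsB (l0 ++ t) cur acc =
      PySem.Chars.splitlines.go pvIsB t (l0.reverse ++ cur) acc := by
  intro l0
  induction l0 with
  | nil => intro t cur acc _; simp
  | cons c l0' ih =>
    intro t cur acc h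
    have hcb : pvIsB c = false := h c (by simp)
    have hcr : c ≠ '\r' := by rintro rfl; simp [pvIsB] at hcb
    rw [List.cons_append, go_cons_ne c hcr, if_neg (by simp [hcb]),
        ih t (c :: cur) acc (fun x hx => h x (by simp [hx]))]
    simp

-- splitlines of a break-free string
lemma splitlines_no_break (s : List Char) (h : ∀ c ∈ s, pvIsB c = false) :
    PySem.Chars.splitlines s = if s.isEmpty then [] else [s] := by
  rw [splitlines_eq_go, show s = s ++ [] by simp, go_absorb s [] [] [] h, go_nil]
  by_cases hs : s.isEmpty
  · simp [hs]
  · simp [hs]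

-- splitlines peels one line off
lemma splitlines_peel (l0 sep rest : List Char)
    (hl0 : ∀ c ∈ l0, pvIsB c = false)
    (hsep : sep = ['\n'] ∨ sep = ['\r', '\n'] ∨ (sep = ['\r'] ∧ ∀ x ∈ rest.head?, x ≠ '\n')) :
    PySem.Chars.splitlines (l0 ++ sep ++ rest) = l0 :: PySem.Chars.splitlines rest := by
  rw [splitlines_eq_go, List.append_assoc, go_absorb l0 (sep ++ rest) [] [] hl0]
  have step : PySem.Chars.splitlines.go pvIsB (sep ++ rest) (l0.reverse ++ []) [] =
      PySem.Chars.splitlines.go pvIsB rest [] [l0] := by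
    rcases hsep with h1 | h1 | ⟨h1, h2⟩
    · subst h1
      rw [List.cons_append, List.nil_append, go_cons_ne '\n' (by decide), if_pos (by decide)]
      simp
    · subst h1
      simp only [List.cons_append, List.nil_append, go_crlf]
      simp
    · subst h1
      rcases rest with _ | ⟨x, r'⟩
      · rw [show (['\r'] ++ [] : List Char) = ['\r'] by simp, go_cr_nil]
        simp
      · have hx : x ≠ '\n' := by simpa using h2 x
        rw [List.cons_append, List.nil_append, go_cr_cons x hx]
        simp
    
  rw [step, go_acc, splitlines_eq_go]
  simp

-- the decomposition of a string at its first line break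
lemma pvDecomp (s : List Char) :
    (∀ c ∈ s, pvLB c = false) ∨
    ∃ l0 sep rest, s = l0 ++ sep ++ rest ∧ (∀ c ∈ l0, pvLB c = false) ∧
      (sep = ['\n'] ∨ sep = ['\r', '\n'] ∨ (sep = ['\r'] ∧ ∀ x ∈ rest.head?, x ≠ '\n')) := by
  induction s with
  | nil => exact Or.inl (by simp)
  | cons c t ih =>
    by_cases hc : pvLB c = false
    · rcases ih with h | ⟨l0, sep, rest, heq, hl0, hsep⟩
      · exact Or.inl (by
          intro x hx
          rcases List.mem_cons.mp hx with rfl | hx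
          · exact hc
          · exact h x hx)
      · exact Or.inr ⟨c :: l0, sep, rest, by simp [heq], by
          intro x hx
          rcases List.mem_cons.mp hx with rfl | hx
          · exact hc
          · exact hl0 x hx, hsep⟩
    · have hc' : c = '\n' ∨ c = '\r' := by
        by_cases h1 : c = '\n'
        · exact Or.inl h1
        · by_cases h2 : c = '\r'
          · exact Or.inr h2
          · exact absurd (by simp [pvLB, h1, h2]) hc
      rcases hc' with rfl | rfl
      · exact Or.inr ⟨[], ['\n'], t, by simp, by simp, Or.inl rfl⟩
      · rcases t with _ | ⟨x, t'⟩
        · exact Or.inr ⟨[], ['\r'], [], by simp, by simp, Or.inr (Or.inr ⟨rfl, by simp⟩)⟩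
        · by_cases hx : x = '\n'
          · subst hx
            exact Or.inr ⟨[], ['\r', '\n'], t', by simp, by simp, Or.inr (Or.inl rfl)⟩
          · exact Or.inr ⟨[], ['\r'], x :: t', by simp, by simp,
              Or.inr (Or.inr ⟨rfl, by simpa using hx⟩)⟩



lemma prefix_single_iff (c : Char) (t : List Char) :
    [c].isPrefixOf t = true ↔ t.head? = some c := by
  cases t with
  | nil => simp [List.isPrefixOf]
  | cons x xs => simp [List.isPrefixOf]; exact eq_comm

lemma prefix_single_drop (c : Char) (l : List Char) (j : Nat) :
    [c].isPrefixOf (l.drop j) = true ↔ l[j]? = some c := by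
  rw [prefix_single_iff, List.head?_drop]

lemma replace_go_single (c : Char) :
    ∀ (l : List Char) (fuel : Nat) (acc : List Char), l.length ≤ fuel →
      PySem.Chars.replace.go [c] [] fuel l acc = acc.reverse ++ l.filter (fun x => !(x == c)) := by
  intro l
  induction l with
  | nil =>
    intro fuel acc _
    cases fuel <;> simp [PySem.Chars.replace.go]
  | cons x t ih =>
    intro fuel acc hle
    cases fuel with
    | zero => simp at hle
    | succ f =>
      rw [PySem.Chars.replace.go]
      by_cases h : x = c
      · subst h
        rw [if_pos (by simp [List.isPrefixOf])]
        have := ih f acc (by simpa using hle)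
        simpa using this
      · rw [if_neg (by simp [List.isPrefixOf]; intro hc; exact h hc.symm)]
        rw [ih f (x :: acc) (by simpa using hle)]
        simp [h]

lemma replace_single_filter (c : Char) (l : List Char) :
    PySem.Chars.replace l [c] [] = l.filter (fun x => !(x == c)) := by
  rw [PySem.Chars.replace]
  rw [if_neg (by simp)]
  simpa using replace_go_single c l l.length [] (le_refl _)


lemma rfind_go_single_none (l : List Char) (c : Char) :
    ∀ k : Nat, (∀ j : Nat, j ≤ k → l[j]? ≠ some c) → PySem.Chars.rfind.go l [c] k = -1 := by
  intro k
  induction k with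
  | zero =>
    intro h
    rw [PySem.Chars.rfind.go]
    rw [if_neg]
    intro hp
    exact h 0 (le_refl _) ((prefix_single_drop c l 0).mp (by simpa using hp))
  | succ j ih =>
    intro h
    rw [PySem.Chars.rfind.go]
    rw [if_neg]
    · exact ih (fun i hi => h i (Nat.le_succ_of_le hi))
    · intro hp
      exact h (j+1) (le_refl _) ((prefix_single_drop c l (j+1)).mp hp)

lemma rfind_go_single_some (l : List Char) (c : Char) :
    ∀ (k j : Nat), j ≤ k → l[j]? = some c → (∀ i : Nat, j < i → i ≤ k → l[i]? ≠ some c) →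
      PySem.Chars.rfind.go l [c] k = (j : Int) := by
  intro k
  induction k with
  | zero =>
    intro j hj hget _
    interval_cases j
    rw [PySem.Chars.rfind.go]
    rw [if_pos (by simpa using (prefix_single_drop c l 0).mpr hget)]
    rfl
  | succ k ih =>
    intro j hj hget hmax
    rw [PySem.Chars.rfind.go]
    by_cases hjk : j = k + 1
    · subst hjk
      rw [if_pos ((prefix_single_drop c l (k+1)).mpr hget)]
    · have hj' : j ≤ k := by omega
      rw [if_neg]
      · exact ih j hj' hget (fun i h1 h2 => hmax i h1 (Nat.le_succ_of_le h2))
      · intro hp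
        exact hmax (k+1) (by omega) (le_refl _) ((prefix_single_drop c l (k+1)).mp hp)

lemma rfind_single_none (l : List Char) (c : Char) (h : ∀ j : Nat, l[j]? ≠ some c) :
    PySem.Chars.rfind l [c] = -1 := by
  rw [PySem.Chars.rfind]
  exact rfind_go_single_none l c l.length (fun j _ => h j)

lemma rfind_single_some (l : List Char) (c : Char) (j : Nat) (hj : l[j]? = some c)
    (hmax : ∀ i : Nat, j < i → l[i]? ≠ some c) :
    PySem.Chars.rfind l [c] = (j : Int) := by
  rw [PySem.Chars.rfind]
  have hlt : j < l.length := by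
    by_contra hge
    simp [List.getElem?_eq_none (show l.length ≤ j by omega)] at hj
  exact rfind_go_single_some l c l.length j (by omega) hj (fun i h1 _ => hmax i h1)


lemma occ_infix (s m : List Char) (j : Nat) (hocc : m <+: s.drop j) : m <:+: s :=
  hocc.isInfix.trans (List.drop_suffix j s).isInfix

lemma occ_drop_add (s : List Char) (m : List Char) (k u : Nat)
    (h : m <+: (s.drop k).drop u) : m <+: s.drop (k + u) := by
  rwa [List.drop_drop] at h

lemma find_eq_of_first (s m : List Char) (j : Nat) (hocc : m <+: s.drop j)
    (hfirst : ∀ i : Nat, i < j → ¬ m <+: s.drop i) :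
    PySem.Chars.find s m = (j : Int) := by
  have hnn : 0 ≤ PySem.Chars.find s m := (PySem.Chars.find_nonneg_iff s m).mpr (occ_infix s m j hocc)
  obtain ⟨hp, hmin⟩ := PySem.Chars.find_spec hnn
  set f := (PySem.Chars.find s m).toNat with hf
  have h1 : ¬ f < j := fun h => hfirst f h hp
  have h2 : ¬ j < f := fun h => hmin j h hocc
  have : f = j := by omega
  omega

lemma find_shift (s r m : List Char) (k : Nat) (hdrop : s.drop k = r)
    (hnone : ∀ i : Nat, i < k → ¬ m <+: s.drop i) :
    PySem.Chars.find s m =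
      (if PySem.Chars.find r m = -1 then -1 else (k : Int) + PySem.Chars.find r m) := by
  by_cases h : PySem.Chars.find r m = -1
  · rw [if_pos h]
    rw [PySem.Chars.find_eq_neg_one_iff]
    intro hinf
    have : ∃ i : Nat, m <+: s.drop i := by
      obtain ⟨p, q, hpq⟩ := hinf
      refine ⟨p.length, ?_⟩
      rw [← hpq, List.append_assoc, List.drop_left]
      exact List.prefix_append _ _
    obtain ⟨i, hi⟩ := this
    by_cases hik : i < k
    · exact hnone i hik hi
    · have : m <+: r.drop (i - k) := by
        rw [← hdrop, List.drop_drop]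
        rwa [show k + (i - k) = i by omega]
      exact (PySem.Chars.find_eq_neg_one_iff r m).mp h (occ_infix r m _ this)
  · rw [if_neg h]
    have hnn : 0 ≤ PySem.Chars.find r m := by
      have := PySem.Chars.neg_one_le_find r m
      omega
    obtain ⟨hp, hmin⟩ := PySem.Chars.find_spec hnn
    set u := (PySem.Chars.find r m).toNat with hu
    have hocc : m <+: s.drop (k + u) := occ_drop_add s m k u (by rwa [hdrop])
    have : PySem.Chars.find s m = ((k + u : Nat) : Int) := by
      apply find_eq_of_first s m (k + u) hocc
      intro i hi
      by_cases hik : i < k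
      · exact hnone i hik
      · intro hpre
        apply hmin (i - k) (by omega)
        rw [← hdrop, List.drop_drop]
        rwa [show k + (i - k) = i by omega]
    omega

-- ---------- last-occurrence model of rfind for a single char ----------
def pvLast (c : Char) : List Char → Int
  | [] => -1
  | x :: t => if 0 ≤ pvLast c t then 1 + pvLast c t else if x = c then 0 else -1

lemma pvLast_ge (c : Char) (l : List Char) : -1 ≤ pvLast c l := by
  induction l with
  | nil => simp [pvLast]
  | cons x t ih => simp only [pvLast]; split_ifs <;> omega

lemma pvLast_lt_length (c : Char) (l : List Char) : pvLast c l < l.length := by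
  induction l with
  | nil => simp [pvLast]
  | cons x t ih => simp only [pvLast, List.length_cons]; split_ifs <;> push_cast <;> omega

lemma pvLast_spec (c : Char) (l : List Char) :
    (pvLast c l = -1 ∧ ∀ j : Nat, l[j]? ≠ some c) ∨
    (∃ j : Nat, pvLast c l = (j : Int) ∧ l[j]? = some c ∧ ∀ i : Nat, j < i → l[i]? ≠ some c) := by
  induction l with
  | nil => exact Or.inl ⟨rfl, by simp⟩
  | cons x t ih =>
    rcases ih with ⟨h1, h2⟩ | ⟨j, h1, h2, h3⟩
    · by_cases hx : x = c
      · refine Or.inr ⟨0, ?_, by simp [hx], ?_⟩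
        · simp [pvLast, h1, hx]
        · intro i hi
          rcases i with _ | i
          · omega
          · simpa using h2 i
      · refine Or.inl ⟨by simp [pvLast, h1, hx], ?_⟩
        intro j
        rcases j with _ | j
        · simpa using hx
        · simpa using h2 j
    · refine Or.inr ⟨j + 1, ?_, by simpa using h2, ?_⟩
      · have : (0 : Int) ≤ pvLast c t := by omega
        simp [pvLast, this, h1]
        push_cast
        omega
      · intro i hi
        rcases i with _ | i
        · omega
        · simpa using h3 i (by omega)

lemma rfind_eq_pvLast (c : Char) (l : List Char) :
    PySem.Chars.rfind l [c] = pvLast c l := by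
  rcases pvLast_spec c l with ⟨h1, h2⟩ | ⟨j, h1, h2, h3⟩
  · rw [rfind_single_none l c h2, h1]
  · rw [rfind_single_some l c j h2 h3, h1]

lemma pvLast_append (c : Char) (x y : List Char) :
    pvLast c (x ++ y) =
      if 0 ≤ pvLast c y then (x.length : Int) + pvLast c y else pvLast c x := by
  induction x with
  | nil =>
    have := pvLast_ge c y
    simp [pvLast]
    intro h
    omega
  | cons a x' ih =>
    rw [List.cons_append]
    simp only [pvLast, ih, List.length_cons]
    have h1 := pvLast_ge c y
    have h2 := pvLast_ge c x'
    split_ifs <;> push_cast <;> omega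

lemma pvLast_no (c : Char) (l : List Char) (h : ∀ x ∈ l, x ≠ c) : pvLast c l = -1 := by
  induction l with
  | nil => rfl
  | cons a t ih =>
    have := ih (fun x hx => h x (by simp [hx]))
    simp [pvLast, this, h a (by simp)]

-- ---------- min? over a shifted list ----------
lemma foldl_min_map_add (k : Int) : ∀ (t : List Int) (x : Int),
    (t.map (fun v => k + v)).foldl min (k + x) = k + t.foldl min x := by
  intro t
  induction t with
  | nil => simp
  | cons a t ih =>
    intro x
    simp only [List.map_cons, List.foldl_cons]
    rw [show min (k + x) (k + a) = k + min x a by omega]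
    exact ih (min x a)

lemma min?_map_add (k : Int) (l : List Int) :
    PySem.List.min? (l.map (fun v => k + v)) (fun p => p) =
      (PySem.List.min? l (fun p => p)).map (fun v => k + v) := by
  cases l with
  | nil => simp [PySem.List.min?]
  | cons x t =>
    rw [List.map_cons, PySem.List.min?_id_cons, PySem.List.min?_id_cons]
    simp [foldl_min_map_add]

lemma marker_props_bool :
    pvMarkers.all (fun m => !m.isEmpty && m.all (fun c => !pvLB c)) = true := by rfl

lemma marker_props : ∀ m ∈ pvMarkers, m ≠ [] ∧ ∀ c ∈ m, pvLB c = false := by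
  have h := marker_props_bool
  rw [List.all_eq_true] at h
  intro m hm
  have hb := h m hm
  rw [Bool.and_eq_true, List.all_eq_true] at hb
  refine ⟨by simpa using hb.1, fun c hc => by simpa using hb.2 c hc⟩

-- prefix yields chars
lemma prefix_getElem? (m t : List Char) (h : m <+: t) (j : Nat) (hj : j < m.length) :
    t[j]? = m[j]? := by
  obtain ⟨q, rfl⟩ := h
  rw [List.getElem?_append_left hj]

lemma prefix_of_append_of_le (m a b : List Char) (h : m <+: a ++ b)
    (hlen : m.length ≤ a.length) : m <+: a := by
  have h1 : m = (a ++ b).take m.length := List.prefix_iff_eq_take.mp h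
  rw [List.take_append_of_le_length hlen] at h1
  rw [h1]
  exact List.take_prefix _ _

lemma occ_head (s m : List Char) (i : Nat) (hocc : m <+: s.drop i) (hm : 0 < m.length) :
    s[i]? = m[0]? := by
  have h0 : (s.drop i)[0]? = m[0]? := prefix_getElem? m _ hocc 0 hm
  rw [List.getElem?_drop] at h0
  simpa using h0

-- no occurrence of a marker strictly before the first line break region
lemma no_occ_before (l0 sep rest m : List Char) (hm : 0 < m.length)
    (hnoLB : ∀ c ∈ m, pvLB c = false)
    (hl0 : ¬ (m <:+: l0)) (hl0LB : ∀ c ∈ l0, pvLB c = false)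
    (hsepLB : ∀ c ∈ sep, pvLB c = true) (hsepne : sep ≠ []) :
    ∀ i : Nat, i < l0.length + sep.length → ¬ m <+: (l0 ++ sep ++ rest).drop i := by
  obtain ⟨c0, sep', rfl⟩ : ∃ c0 sep', sep = c0 :: sep' := by
    cases sep with
    | nil => exact absurd rfl hsepne
    | cons c0 sep' => exact ⟨c0, sep', rfl⟩
  have hc0 : pvLB c0 = true := hsepLB c0 (by simp)
  intro i hi hocc
  by_cases hil : i < l0.length
  · by_cases hfit : i + m.length ≤ l0.length
    · -- the occurrence fits inside l0
      apply hl0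
      have hpre : m <+: l0.drop i ++ ((c0 :: sep') ++ rest) := by
        rwa [List.append_assoc, List.drop_append_of_le_length (by omega)] at hocc
      have : m <+: l0.drop i :=
        prefix_of_append_of_le m _ _ hpre (by simp; omega)
      exact occ_infix l0 m i this
    · -- the occurrence covers the break char at position l0.length
      have hj : l0.length - i < m.length := by omega
      have hval : (l0 ++ (c0 :: sep') ++ rest)[l0.length]? = m[l0.length - i]? := by
        have h1 := prefix_getElem? m _ hocc (l0.length - i) hj
        rw [List.getElem?_drop] at h1
        rwa [show i + (l0.length - i) = l0.length by omega] at h1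
      have hsepchar : (l0 ++ (c0 :: sep') ++ rest)[l0.length]? = some c0 := by
        rw [List.append_assoc, List.getElem?_append_right (le_refl _)]
        simp
      rw [hval] at hsepchar
      have hmem : m[l0.length - i] ∈ m := List.getElem_mem _
      have hLBm := hnoLB _ hmem
      rw [show m[l0.length - i] = c0 by
        have := List.getElem?_eq_getElem (l := m) (i := l0.length - i) hj
        rw [this] at hsepchar
        injection hsepchar] at hLBm
      rw [hc0] at hLBm
      exact Bool.noConfusion hLBm
  · -- i points into the separator: first char of m would be a line break
    have hval := occ_head _ m i hocc hm
    have hin : (l0 ++ (c0 :: sep') ++ rest)[i]? = m[0]? := hval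
    rw [List.append_assoc, List.getElem?_append_right (by omega),
        List.getElem?_append_left (by simp at hi ⊢; omega)] at hin
    have hg : (c0 :: sep')[i - l0.length]? = some m[0] := by
      rw [hin, List.getElem?_eq_getElem hm]
    have hxmem := List.mem_of_getElem? hg
    have h1 : pvLB m[0] = true := hsepLB _ hxmem
    have h2 : pvLB m[0] = false := hnoLB _ (List.getElem_mem hm)
    rw [h1] at h2
    exact Bool.noConfusion h2

-- ---------- hits facts ----------
lemma mem_hits (s : List Char) (v : Int) :
    v ∈ pvHits s ↔ (∃ m ∈ pvMarkers, PySem.Chars.find s m = v) ∧ 0 ≤ v := by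
  simp [pvHits, List.mem_filter, List.mem_map]

lemma hits_empty_iff (s : List Char) :
    pvHits s = [] ↔ ∀ m ∈ pvMarkers, ¬ m <:+: s := by
  constructor
  · intro h m hm hinf
    have hv : PySem.Chars.find s m ∈ pvHits s := by
      rw [mem_hits]
      exact ⟨⟨m, hm, rfl⟩, (PySem.Chars.find_nonneg_iff s m).mpr hinf⟩
    rw [h] at hv
    exact List.not_mem_nil hv
  · intro h
    rw [List.eq_nil_iff_forall_not_mem]
    intro v hv
    rw [mem_hits] at hv
    obtain ⟨⟨m, hm, hf⟩, hnn⟩ := hv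
    have : m <:+: s := (PySem.Chars.find_nonneg_iff s m).mp (hf ▸ hnn)
    exact h m hm this

lemma pvHit_iff_infix (l : List Char) :
    pvHit l = true ↔ ∃ m ∈ pvMarkers, m <:+: l := by
  simp [pvHit, PySem.Chars.isIn_iff_infix]

lemma filter_nonneg_map_shift (k : Int) (hk : 0 ≤ k) : ∀ l : List Int, (∀ v ∈ l, -1 ≤ v) →
    ((l.map (fun v => if v = -1 then (-1 : Int) else k + v)).filter (fun p => 0 ≤ p)) =
      (l.filter (fun p => (0 : Int) ≤ p)).map (fun v => k + v) := by
  intro l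
  induction l with
  | nil => intro _; simp
  | cons a t ih =>
    intro h
    have ha : -1 ≤ a := h a (by simp)
    have ht := ih (fun v hv => h v (by simp [hv]))
    by_cases hne : a = -1
    · subst hne
      simp only [List.map_cons, List.filter_cons]
      norm_num
      exact ht
    · have h0 : 0 ≤ a := by omega
      simp only [List.map_cons, List.filter_cons, if_neg hne]
      simp only [show ((0:Int) ≤ k + a) from by omega, show ((0:Int) ≤ a) from h0, decide_true]
      simp only [if_true]
      rw [ht]
      simp

lemma hits_shift (l0 sep rest : List Char)
    (hnocc : ∀ m ∈ pvMarkers, ∀ i : Nat, i < l0.length + sep.length →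
      ¬ m <+: (l0 ++ sep ++ rest).drop i) :
    pvHits (l0 ++ sep ++ rest) =
      (pvHits rest).map (fun v => ((l0.length + sep.length : Nat) : Int) + v) := by
  set s := l0 ++ sep ++ rest with hs
  set k := l0.length + sep.length with hk
  have hdrop : s.drop k = rest := by
    rw [hs, hk, ← List.length_append]
    exact List.drop_left
  have hmap : pvMarkers.map (fun m => PySem.Chars.find s m) =
      (pvMarkers.map (fun m => PySem.Chars.find rest m)).map
        (fun v => if v = -1 then (-1 : Int) else (k : Int) + v) := by
    rw [List.map_map]
    apply List.map_congr_left
    intro m hm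
    exact find_shift s rest m k hdrop (fun i hi => hnocc m hm i hi)
  unfold pvHits
  rw [hmap]
  rw [filter_nonneg_map_shift (k : Int) (by positivity) _
    (fun v hv => by
      obtain ⟨m, _, rfl⟩ := List.mem_map.mp hv
      exact PySem.Chars.neg_one_le_find rest m)]

-- ---------- the prefix is empty when everything before the cut is break-free ----------
lemma prefix_nil (s : List Char) (hne : ¬ (pvHits s).isEmpty = true)
    (hnoLB : ∀ c ∈ s.take ((PySem.List.min? (pvHits s) (fun p => p)).getD 0).toNat,
      pvLB c = false) :
    pvPrefix s = [] := by
  unfold pvPrefix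
  rw [if_neg hne]
  have hcut0 : 0 ≤ (PySem.List.min? (pvHits s) (fun p => p)).getD 0 := by
    cases hmin : PySem.List.min? (pvHits s) (fun p => p) with
    | none => simp
    | some v =>
      have := PySem.List.min?_mem hmin
      rw [mem_hits] at this
      simpa [hmin] using this.2
  simp only [PySem.Chars.slice_eq_listSlice]
  rw [PySem.List.slice_to s hcut0]
  rw [rfind_eq_pvLast, rfind_eq_pvLast]
  rw [pvLast_no '\n' _ (fun x hx => by
      have := hnoLB x hx
      simp [pvLB] at this
      exact this.1),
    pvLast_no '\r' _ (fun x hx => by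
      have := hnoLB x hx
      simp [pvLB] at this
      exact this.2)]
  rw [show (max (-1 : Int) (-1) + 1) = 0 from by norm_num]
  rw [PySem.List.slice_to _ (le_refl (0 : Int))]
  simp

lemma LBfree_ne (l : List Char) (h : ∀ c ∈ l, pvLB c = false) :
    (∀ c ∈ l, c ≠ '\n') ∧ (∀ c ∈ l, c ≠ '\r') := by
  constructor <;> (intro c hc he; subst he; have := h _ hc; simp [pvLB] at this)

lemma lastLB_l0sep (l0 sep : List Char) (hl0 : ∀ c ∈ l0, pvLB c = false)
    (hsep : sep = ['\n'] ∨ sep = ['\r', '\n'] ∨ sep = ['\r']) :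
    (pvLast '\n' (l0 ++ sep) ≤ ((l0.length + sep.length : Nat) : Int) - 1) ∧
    (pvLast '\r' (l0 ++ sep) ≤ ((l0.length + sep.length : Nat) : Int) - 1) ∧
    (max (pvLast '\n' (l0 ++ sep)) (pvLast '\r' (l0 ++ sep)) =
      ((l0.length + sep.length : Nat) : Int) - 1) := by
  obtain ⟨hn, hr⟩ := LBfree_ne l0 hl0
  have bn := pvLast_lt_length '\n' (l0 ++ sep)
  have br := pvLast_lt_length '\r' (l0 ++ sep)
  rw [List.length_append] at bn br
  refine ⟨by push_cast; omega, by push_cast; omega, ?_⟩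
  rcases hsep with rfl | rfl | rfl
  · rw [pvLast_append, pvLast_append,
      show pvLast '\n' ['\n'] = 0 by decide, show pvLast '\r' ['\n'] = -1 by decide,
      if_pos (by omega), if_neg (by omega), pvLast_no '\r' l0 hr]
    simp
    all_goals omega
  · rw [pvLast_append, pvLast_append,
      show pvLast '\n' ['\r', '\n'] = 1 by decide, show pvLast '\r' ['\r', '\n'] = 0 by decide,
      if_pos (by omega), if_pos (by omega)]
    simp
    all_goals omega
  · rw [pvLast_append, pvLast_append,
      show pvLast '\n' ['\r'] = -1 by decide, show pvLast '\r' ['\r'] = 0 by decide,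
      if_neg (by omega), if_pos (by omega), pvLast_no '\n' l0 hn]
    simp
    all_goals omega

lemma prefix_step (l0 sep rest : List Char)
    (hl0 : ∀ c ∈ l0, pvLB c = false)
    (hsep : sep = ['\n'] ∨ sep = ['\r', '\n'] ∨ sep = ['\r'])
    (hnocc : ∀ m ∈ pvMarkers, ∀ i : Nat, i < l0.length + sep.length →
      ¬ m <+: (l0 ++ sep ++ rest).drop i)
    (hrne : ¬ (pvHits rest).isEmpty = true) :
    pvPrefix (l0 ++ sep ++ rest) = l0 ++ sep ++ pvPrefix rest := by
  set k := l0.length + sep.length with hk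
  have hshift := hits_shift l0 sep rest hnocc
  have hrne' : pvHits rest ≠ [] := by simpa [List.isEmpty_iff] using hrne
  obtain ⟨v, hv⟩ : ∃ v, PySem.List.min? (pvHits rest) (fun p => p) = some v := by
    cases hmin : PySem.List.min? (pvHits rest) (fun p => p) with
    | none => exact absurd ((PySem.List.min?_eq_none_iff _ _).mp hmin) hrne'
    | some v => exact ⟨v, rfl⟩
  have hvmem := PySem.List.min?_mem hv
  rw [mem_hits] at hvmem
  obtain ⟨⟨mv, hmv, hfv⟩, hv0⟩ := hvmem
  have hvle : v ≤ (rest.length : Int) := hfv ▸ PySem.Chars.find_le_length rest mv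
  have hsne : ¬ (pvHits (l0 ++ sep ++ rest)).isEmpty = true := by
    rw [hshift]
    simpa [List.isEmpty_iff] using hrne'
  have hmin_s : PySem.List.min? (pvHits (l0 ++ sep ++ rest)) (fun p => p) =
      some ((k : Int) + v) := by
    rw [hshift, min?_map_add, hv]
    rfl
  unfold pvPrefix
  rw [if_neg hsne, if_neg hrne, hmin_s, hv]
  simp only [Option.getD_some]
  simp only [PySem.Chars.slice_eq_listSlice]
  rw [PySem.List.slice_to (l0 ++ sep ++ rest) (show (0:Int) ≤ (k : Int) + v from by omega),
      PySem.List.slice_to rest hv0]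
  have htoNat : ((k : Int) + v).toNat = k + v.toNat := by omega
  rw [htoNat]
  have htake : (l0 ++ sep ++ rest).take (k + v.toNat) = (l0 ++ sep) ++ rest.take v.toNat := by
    rw [hk, ← List.length_append]
    exact List.take_length_add_append _
  rw [htake]
  set q := rest.take v.toNat with hq
  rw [rfind_eq_pvLast, rfind_eq_pvLast, rfind_eq_pvLast, rfind_eq_pvLast]
  obtain ⟨b1, b2, b3⟩ := lastLB_l0sep l0 sep hl0 hsep
  have an := pvLast_ge '\n' q
  have ar := pvLast_ge '\r' q
  rw [pvLast_append '\n' (l0 ++ sep) q, pvLast_append '\r' (l0 ++ sep) q]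
  have hstart : (max (if 0 ≤ pvLast '\n' q then ((l0 ++ sep).length : Int) + pvLast '\n' q
        else pvLast '\n' (l0 ++ sep))
      (if 0 ≤ pvLast '\r' q then ((l0 ++ sep).length : Int) + pvLast '\r' q
        else pvLast '\r' (l0 ++ sep)) + 1) =
      (k : Int) + (max (pvLast '\n' q) (pvLast '\r' q) + 1) := by
    rw [List.length_append]
    split_ifs <;> push_cast at b1 b2 b3 ⊢ <;> omega
  rw [hstart]
  have hs0 : 0 ≤ max (pvLast '\n' q) (pvLast '\r' q) + 1 := by omega
  rw [PySem.List.slice_to _ (show (0:Int) ≤ (k : Int) + (max (pvLast '\n' q) (pvLast '\r' q) + 1) from by omega),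
      PySem.List.slice_to _ hs0]
  have htoNat2 : ((k : Int) + (max (pvLast '\n' q) (pvLast '\r' q) + 1)).toNat =
      k + (max (pvLast '\n' q) (pvLast '\r' q) + 1).toNat := by omega
  rw [htoNat2]
  rw [show ((l0 ++ sep) ++ q).take (k + (max (pvLast '\n' q) (pvLast '\r' q) + 1).toNat) =
      (l0 ++ sep) ++ q.take (max (pvLast '\n' q) (pvLast '\r' q) + 1).toNat by
    rw [hk, ← List.length_append, List.take_length_add_append]]

-- ---------- A-side body shape ----------

-- ---------- A-side body shape ----------
lemma ABody_of_hit (s l0 : List Char) (L : List (List Char))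
    (hsl : PySem.Chars.splitlines s = l0 :: L) (hh : pvHit l0 = true) : pvABody s = [] := by
  unfold pvABody
  rw [hsl, List.findIdx?_cons, if_pos hh]
  simp [PySem.Chars.join_nil]

lemma ABody_cons (s rest l0 : List Char)
    (hsl : PySem.Chars.splitlines s = l0 :: PySem.Chars.splitlines rest)
    (hh : pvHit l0 = false) : pvABody s = l0 ++ pvABody rest := by
  unfold pvABody
  rw [hsl, List.findIdx?_cons, if_neg (by simp [hh])]
  cases hfi : (PySem.Chars.splitlines rest).findIdx? pvHit with
  | none => simp [List.take_succ_cons, join_empty_cons]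
  | some k => simp [List.take_succ_cons, join_empty_cons]

lemma prefix_all (s : List Char) (h : (pvHits s).isEmpty = true) : pvPrefix s = s := by
  unfold pvPrefix
  rw [if_pos h]

-- when the first line already contains a marker, B's prefix is empty
lemma prefix_nil_of_hit_head (l0 t : List Char) (hh : pvHit l0 = true)
    (hl0 : ∀ c ∈ l0, pvLB c = false) :
    pvPrefix (l0 ++ t) = [] := by
  obtain ⟨m, hm, hinf⟩ := (pvHit_iff_infix l0).mp hh
  obtain ⟨hmne, _⟩ := marker_props m hm
  obtain ⟨p, q, hpq⟩ := hinf
  have hocc0 : m <+: l0.drop p.length := by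
    have : l0.drop p.length = m ++ q := by
      rw [← hpq, List.append_assoc, List.drop_left]
    rw [this]
    exact List.prefix_append _ _
  have hocc : m <+: (l0 ++ t).drop p.length := by
    rw [List.drop_append_of_le_length (by
      have := congrArg List.length hpq
      simp at this
      omega)]
    obtain ⟨q', hq'⟩ := hocc0
    exact ⟨q' ++ t, by rw [← List.append_assoc, hq']⟩
  have hjlt : p.length < l0.length := by
    have := congrArg List.length hpq
    simp at this
    have : 0 < m.length := by cases m <;> simp_all
    omega
  have hnn : 0 ≤ PySem.Chars.find (l0 ++ t) m :=
    (PySem.Chars.find_nonneg_iff _ m).mpr (occ_infix _ m _ hocc)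
  obtain ⟨_, hmin⟩ := PySem.Chars.find_spec hnn
  have hfle : PySem.Chars.find (l0 ++ t) m ≤ (p.length : Int) := by
    by_contra hgt
    exact hmin p.length (by omega) hocc
  have hmemhits : PySem.Chars.find (l0 ++ t) m ∈ pvHits (l0 ++ t) := by
    rw [mem_hits]
    exact ⟨⟨m, hm, rfl⟩, hnn⟩
  have hne : ¬ (pvHits (l0 ++ t)).isEmpty = true := by
    simp [List.isEmpty_iff, List.eq_nil_iff_forall_not_mem]
    exact ⟨_, hmemhits⟩
  apply prefix_nil _ hne
  obtain ⟨v, hv⟩ : ∃ v, PySem.List.min? (pvHits (l0 ++ t)) (fun p => p) = some v := by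
    cases hmin' : PySem.List.min? (pvHits (l0 ++ t)) (fun p => p) with
    | none =>
      rw [PySem.List.min?_eq_none_iff _ _] at hmin'
      rw [hmin'] at hmemhits
      exact absurd hmemhits (List.not_mem_nil)
    | some v => exact ⟨v, rfl⟩
  have hvle := PySem.List.min?_isMin hv _ hmemhits
  have hv0 : 0 ≤ v := by
    have := PySem.List.min?_mem hv
    rw [mem_hits] at this
    exact this.2
  rw [hv]
  simp only [Option.getD_some]
  intro c hc
  have hvlt : v.toNat ≤ l0.length := by omega
  rw [List.take_append_of_le_length hvlt] at hc
  exact hl0 c (List.take_subset _ _ hc)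

lemma sep_LB (sep : List Char)
    (hsep : sep = ['\n'] ∨ sep = ['\r', '\n'] ∨ sep = ['\r']) :
    ∀ c ∈ sep, pvLB c = true := by
  rcases hsep with rfl | rfl | rfl <;> intro c hc <;> simp at hc
  · subst hc; rfl
  · rcases hc with rfl | rfl <;> rfl
  · subst hc; rfl

-- ---------- the main bridge ----------
lemma main_bridge_aux : ∀ (n : Nat) (s : List Char), s.length ≤ n →
    (∀ c ∈ s, pvDomChar c = true) →
    pvABody s = (pvPrefix s).filter (fun c => !(pvLB c)) := by
  intro n
  induction n with
  | zero =>
    intro s h _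
    have : s = [] := by cases s <;> simp_all
    subst this
    have hnil : pvHits ([] : List Char) = [] := by
      rw [hits_empty_iff]
      intro m hm hinf
      obtain ⟨hmne, _⟩ := marker_props m hm
      exact hmne (List.eq_nil_of_infix_nil hinf)
    rw [prefix_all [] (by rw [List.isEmpty_iff]; exact hnil)]
    rfl
  | succ n ih =>
    intro s hlen hg
    rcases pvDecomp s with hfree | ⟨l0, sep, rest, rfl, hl0, hsep⟩
    · -- no line break at all
      have hIsB : ∀ c ∈ s, pvIsB c = false := by
        intro c hc
        rw [isB_eq_LB c (hg c hc)]
        exact hfree c hc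
      by_cases hh : pvHit s = true
      · have hne : s ≠ [] := by rintro rfl; exact absurd hh (by decide)
        have hsl : PySem.Chars.splitlines s = [s] := by
          rw [splitlines_no_break s hIsB, if_neg (by simpa using hne)]
        rw [ABody_of_hit s s [] hsl hh]
        have hp := prefix_nil_of_hit_head s [] (by simpa using hh) (by simpa using hfree)
        rw [List.append_nil] at hp
        rw [hp]
        rfl
      · have hnoinf : ∀ m ∈ pvMarkers, ¬ m <:+: s := by
          intro m hm hinf
          exact hh ((pvHit_iff_infix s).mpr ⟨m, hm, hinf⟩)
        have hhits : (pvHits s).isEmpty = true := by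
          simp [List.isEmpty_iff]
          exact (hits_empty_iff s).mpr hnoinf
        rw [prefix_all s hhits]
        rw [List.filter_eq_self.mpr (by intro a ha; simp [hfree a ha])]
        rcases s with _ | ⟨c, t⟩
        · rfl
        · have hsl : PySem.Chars.splitlines (c :: t) = [c :: t] := by
            rw [splitlines_no_break _ hIsB, if_neg (by simp)]
          unfold pvABody
          rw [hsl]
          simp [List.findIdx?_cons, hh, PySem.Chars.join_singleton]
    · -- s = l0 ++ sep ++ rest
      have hgl0 : ∀ c ∈ l0, pvDomChar c = true := fun c hc => hg c (by simp [hc])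
      have hgrest : ∀ c ∈ rest, pvDomChar c = true := fun c hc => hg c (by simp [hc])
      have hsep3 : sep = ['\n'] ∨ sep = ['\r', '\n'] ∨ sep = ['\r'] := by
        rcases hsep with h | h | ⟨h, _⟩
        · exact Or.inl h
        · exact Or.inr (Or.inl h)
        · exact Or.inr (Or.inr h)
      have hsepne : sep ≠ [] := by rcases hsep3 with rfl | rfl | rfl <;> simp
      have hseplen : 1 ≤ sep.length := by rcases hsep3 with rfl | rfl | rfl <;> simp
      have hrlen : rest.length ≤ n := by
        have := hlen
        simp [List.length_append] at this
        omega
      have hIsBl0 : ∀ c ∈ l0, pvIsB c = false := by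
        intro c hc
        rw [isB_eq_LB c (hgl0 c hc)]
        exact hl0 c hc
      have hsl : PySem.Chars.splitlines (l0 ++ sep ++ rest) =
          l0 :: PySem.Chars.splitlines rest := by
        apply splitlines_peel l0 sep rest hIsBl0
        rcases hsep with h | h | ⟨h, h2⟩
        · exact Or.inl h
        · exact Or.inr (Or.inl h)
        · exact Or.inr (Or.inr ⟨h, h2⟩)
      by_cases hh : pvHit l0 = true
      · rw [ABody_of_hit _ l0 _ hsl hh]
        rw [List.append_assoc, prefix_nil_of_hit_head l0 (sep ++ rest) hh hl0]
        rfl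
      · have hh' : pvHit l0 = false := by simpa using hh
        rw [ABody_cons _ rest l0 hsl hh']
        have hnocc : ∀ m ∈ pvMarkers, ∀ i : Nat, i < l0.length + sep.length →
            ¬ m <+: (l0 ++ sep ++ rest).drop i := by
          intro m hm
          obtain ⟨hmne, hmnoLB⟩ := marker_props m hm
          apply no_occ_before l0 sep rest m (by cases m <;> simp_all) hmnoLB
            (fun hinf => hh ((pvHit_iff_infix l0).mpr ⟨m, hm, hinf⟩)) hl0
            (sep_LB sep hsep3) hsepne
        by_cases hre : (pvHits rest).isEmpty = true
        · have hrnil : pvHits rest = [] := by simpa [List.isEmpty_iff] using hre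
          have hsnil : (pvHits (l0 ++ sep ++ rest)).isEmpty = true := by
            rw [List.isEmpty_iff, hits_shift l0 sep rest hnocc, hrnil]
            rfl
          rw [prefix_all _ hsnil]
          have hihr := ih rest hrlen hgrest
          rw [prefix_all rest hre] at hihr
          rw [hihr, List.filter_append, List.filter_append]
          rw [show l0.filter (fun c => !(pvLB c)) = l0 from
            List.filter_eq_self.mpr (by intro a ha; simp [hl0 a ha])]
          rw [show sep.filter (fun c => !(pvLB c)) = [] by
            rcases hsep3 with rfl | rfl | rfl <;> rfl]
          simp
        · rw [prefix_step l0 sep rest hl0 hsep3 hnocc hre]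
          rw [ih rest hrlen hgrest]
          rw [List.filter_append, List.filter_append]
          rw [show l0.filter (fun c => !(pvLB c)) = l0 from
            List.filter_eq_self.mpr (by intro a ha; simp [hl0 a ha])]
          rw [show sep.filter (fun c => !(pvLB c)) = [] by
            rcases hsep3 with rfl | rfl | rfl <;> rfl]
          simp

-- ===== VERDICT (by name: the statement is the Claim_ definition above) =====
set_option maxHeartbeats 1000000 in
theorem parse_mainText_spec : Claim_equal_parse_mainText := by
  intro rawtext hdom
  have hg : ∀ c ∈ rawtext.toList, pvDomChar c = true := by
    have : pvDomStr rawtext = true := hdom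
    rw [pvDomStr, List.all_eq_true] at this
    intro c hc
    simpa using this c hc
  unfold Spec_parse_mainText parse_mainText parse_mainText_alt
  rw [loopA_eq]
  have hb := main_bridge_aux rawtext.toList.length rawtext.toList (le_refl _) hg
  unfold pvABody at hb
  rw [List.nil_append, hb]
  simp only [show ("'".toList : List Char) = ['\''] from rfl,
      show ("\"".toList : List Char) = ['"'] from rfl,
      show ("".toList : List Char) = ([] : List Char) from rfl]
  rw [replace_single_filter, replace_single_filter]
  rw [List.filter_filter, List.filter_filter]
  congr 1
  apply List.filter_congr
  intro c _
  cases h1 : (c == '\n') <;> cases h2 : (c == '\r') <;>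
    cases h3 : (c == '\'') <;> cases h4 : (c == '"') <;>
    simp [pvLB, h1, h2, h3, h4]
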